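-- pv_equiv track=rewrite | github.com/marceloarantes19/ia2024 | buscaLocal/Rainhas/rainhasHillClimb.py | melhorVizinho
-- ===== SOURCE A (Python) =====
-- def quantidadeDeAtaques(r):
-- 	qtd = 0
-- 	for i in range(0, len(r)-1):
-- 		for j in range(i+1, len(r)):
-- 			if r[i] == r[j] or abs(i-j)==abs(r[i]-r[j]):
-- 				qtd = qtd + 1
-- 	return qtd
--
-- def melhorVizinho(r):
-- 	na = r[0:len(r)]
-- 	mr = r[0:len(r)]
-- 	mv = quantidadeDeAtaques(r)
-- 	va = mv
-- 	for i in range(0, len(r)):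
-- 		for j in range(0, len(r)):
-- 			if j == r[i]:
-- 				continue
-- 			na = r[0:len(r)]
-- 			na[i] = j
-- 			va = quantidadeDeAtaques(na)
-- 			if va < mv:
-- 				mr = na[0: len(na)]
-- 				mv = va
-- 	return mr, mv
-- ===== SOURCE B (Python) =====
-- def melhorVizinho(r):
--     n = len(r)
--
--     def conflicts_with(i, v):
--         # number of queens k != i attacking a queen placed at (row i, column v)
--         c = 0
--         for k in range(n):
--             if k != i and (r[k] == v or abs(i - k) == abs(v - r[k])):
--                 c += 1
--         return c
--
--     ci = [conflicts_with(i, r[i]) for i in range(n)]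
--     base = sum(ci) // 2          # every attacking pair is counted twice
--     mr = list(r)
--     mv = base
--     for i in range(n):
--         rest = base - ci[i]      # attacks among the queens other than i
--         for j in range(n):
--             if j == r[i]:
--                 continue
--             va = rest + conflicts_with(i, j)
--             if va < mv:
--                 mr = r[:i] + [j] + r[i + 1:]
--                 mv = va
--     return mr, mv
-- ===== Notes on version B (the rewrite author's own statement) =====
-- stated objective: faster
-- what changed: Instead of recomputing the full O(n^2) attack count for every neighbor, B counts each queen's conflicts once (base via double counting / 2) and evaluates each neighbor by the O(n) delta base - ci[i] + conflicts_with(i, j).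
import Mathlib
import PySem

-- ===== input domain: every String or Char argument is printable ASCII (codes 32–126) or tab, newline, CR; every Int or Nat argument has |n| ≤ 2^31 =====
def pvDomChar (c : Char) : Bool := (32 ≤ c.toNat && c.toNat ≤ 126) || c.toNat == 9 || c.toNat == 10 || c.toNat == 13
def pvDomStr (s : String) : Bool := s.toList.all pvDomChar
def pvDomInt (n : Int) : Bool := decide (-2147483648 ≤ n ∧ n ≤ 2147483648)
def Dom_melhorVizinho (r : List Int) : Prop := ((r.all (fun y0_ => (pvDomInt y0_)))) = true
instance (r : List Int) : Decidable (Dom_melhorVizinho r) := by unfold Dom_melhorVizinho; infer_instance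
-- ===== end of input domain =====

-- B replaces A's full O(n^2) attack recount per neighbor by per-queen conflict counts computed
-- once and an O(n) delta per neighbor (objective: faster).

-- ===== PORT A =====
def quantidadeDeAtaques (r : List Int) : Int :=
  (PySem.List.pyRange 0 ((r.length : Int) - 1) 1).foldl (fun qtd i =>
    (PySem.List.pyRange (i + 1) (r.length : Int) 1).foldl (fun qtd j =>
      if PySem.List.pyGetD r i 0 = PySem.List.pyGetD r j 0 ∨
         |i - j| = |PySem.List.pyGetD r i 0 - PySem.List.pyGetD r j 0| then qtd + 1 else qtd) qtd) 0

def melhorVizinho (r : List Int) : List Int × Int :=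
  let na := PySem.List.slice r (some 0) (some (r.length : Int))
  let mr := PySem.List.slice r (some 0) (some (r.length : Int))
  let mv := quantidadeDeAtaques r
  let va := mv
  let st := (PySem.List.pyRange 0 (r.length : Int) 1).foldl (fun (st : List Int × List Int × Int × Int) i =>
    (PySem.List.pyRange 0 (r.length : Int) 1).foldl (fun (st : List Int × List Int × Int × Int) j =>
      if j = PySem.List.pyGetD r i 0 then st
      else
        let na := PySem.List.slice r (some 0) (some (r.length : Int))
        let na := PySem.List.pySetD na i j
        let va := quantidadeDeAtaques na
        if va < st.2.2.1 then (na, PySem.List.slice na (some 0) (some (na.length : Int)), va, va)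
        else (na, st.2.1, st.2.2.1, va)) st) (na, mr, mv, va)
  (st.2.1, st.2.2.1)

-- ===== PORT B =====
def conflictsWith (r : List Int) (i v : Int) : Int :=
  (PySem.List.pyRange 0 (r.length : Int) 1).foldl (fun c k =>
    if k ≠ i ∧ (PySem.List.pyGetD r k 0 = v ∨ |i - k| = |v - PySem.List.pyGetD r k 0|)
    then c + 1 else c) 0

def melhorVizinho_alt (r : List Int) : List Int × Int :=
  let ci := (PySem.List.pyRange 0 (r.length : Int) 1).map
    (fun i => conflictsWith r i (PySem.List.pyGetD r i 0))
  let base := PySem.Int.floordiv ci.sum 2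
  (PySem.List.pyRange 0 (r.length : Int) 1).foldl (fun (st : List Int × Int) i =>
    let rest := base - PySem.List.pyGetD ci i 0
    (PySem.List.pyRange 0 (r.length : Int) 1).foldl (fun (st : List Int × Int) j =>
      if j = PySem.List.pyGetD r i 0 then st
      else
        let va := rest + conflictsWith r i j
        if va < st.2 then
          (PySem.List.slice r (some 0) (some i) ++ [j] ++ PySem.List.slice r (some (i + 1)) none, va)
        else st) st) (r, base)

-- ===== PRECONDITION & SPEC =====
def Spec_melhorVizinho (r : List Int) (out : List Int × Int) : Prop := out = melhorVizinho_alt r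
instance (r : List Int) (out : List Int × Int) : Decidable (Spec_melhorVizinho r out) := by unfold Spec_melhorVizinho; infer_instance

-- ===== CLAIM (what is proved, stated in full; the proofs are below) =====
def Claim_equal_melhorVizinho : Prop := ∀ (r : List Int), Dom_melhorVizinho r → Spec_melhorVizinho r (melhorVizinho r)

-- ===== LEMMAS AND PROOFS =====

def cf (x y : Int) (i k : Nat) : Int :=
  if x = y ∨ |(i : Int) - (k : Int)| = |x - y| then 1 else 0

theorem foldl_ite {α : Type} (P : α → Prop) [DecidablePred P] (l : List α) (a : Int) :
    List.foldl (fun acc x => if P x then acc + 1 else acc) a l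
      = a + (l.map (fun x => if P x then (1:Int) else 0)).sum := by
  induction l generalizing a with
  | nil => simp
  | cons x xs ih =>
      simp only [List.foldl_cons, List.map_cons, List.sum_cons]
      split_ifs <;> rw [ih] <;> ring

theorem list_sum_range (n : Nat) (f : Nat → Int) :
    ((List.range n).map f).sum = ∑ k ∈ Finset.range n, f k := by
  induction n with
  | zero => simp
  | succ m ih => rw [List.range_succ]; simp [Finset.sum_range_succ, ih]

theorem sum_pyRange_zero (n : Nat) (f : Int → Int) :
    ((PySem.List.pyRange 0 (n : Int) 1).map f).sum = ∑ k ∈ Finset.range n, f (k : Int) := by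
  rw [show PySem.List.pyRange 0 (n : Int) 1 = PySem.List.pyRange 0 (n : Int) from rfl,
    PySem.List.pyRange_zero_natCast, List.map_map, list_sum_range]
  rfl

theorem sum_pyRange_succ (i n : Nat) (f : Int → Int) :
    ((PySem.List.pyRange ((i : Int) + 1) (n : Int) 1).map f).sum
      = ∑ t ∈ Finset.range (n - (i + 1)), f ((i : Int) + 1 + (t : Int)) := by
  rw [show PySem.List.pyRange ((i:Int)+1) (n : Int) 1 = PySem.List.pyRange ((i:Int)+1) (n:Int) from rfl,
    PySem.List.pyRange_one, List.map_map, list_sum_range]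
  have : ((n : Int) - ((i:Int)+1)).toNat = n - (i+1) := by omega
  rw [this]
  rfl

def atk (r : List Int) : Int :=
  ∑ i ∈ Finset.range r.length, ∑ k ∈ Finset.range r.length,
    if i < k then cf (r.getD i 0) (r.getD k 0) i k else 0

def common (r : List Int) : Int :=
  ∑ i ∈ Finset.range (r.length - 1), ∑ t ∈ Finset.range (r.length - (i + 1)),
    cf (r.getD i 0) (r.getD (i + 1 + t) 0) i (i + 1 + t)

theorem sum_pyRange_pred (n : Nat) (f : Int → Int) :
    ((PySem.List.pyRange 0 ((n : Int) - 1) 1).map f).sum = ∑ k ∈ Finset.range (n - 1), f (k : Int) := by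
  rw [show PySem.List.pyRange 0 ((n:Int)-1) 1 = PySem.List.pyRange 0 ((n:Int)-1) from rfl,
    PySem.List.pyRange_one, List.map_map, list_sum_range]
  have : (((n : Int) - 1) - 0).toNat = n - 1 := by omega
  rw [this]
  simp

theorem qA_eq_common (r : List Int) : quantidadeDeAtaques r = common r := by
  unfold quantidadeDeAtaques
  simp only [foldl_ite, PySem.List.foldl_add]
  rw [zero_add, sum_pyRange_pred]
  unfold common
  refine Finset.sum_congr rfl (fun i hi => ?_)
  rw [sum_pyRange_succ]
  refine Finset.sum_congr rfl (fun t ht => ?_)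
  have hc : ((i:Int) + 1 + (t:Int)) = ((i + 1 + t : Nat) : Int) := by push_cast; ring
  rw [hc]
  simp only [PySem.List.pyGetD_natCast]
  simp [cf]

theorem atk_eq_common (r : List Int) : atk r = common r := by
  unfold atk common
  have hinner : ∀ i, (∑ k ∈ Finset.range r.length, if i < k then cf (r.getD i 0) (r.getD k 0) i k else 0)
      = ∑ t ∈ Finset.range (r.length - (i + 1)), cf (r.getD i 0) (r.getD (i + 1 + t) 0) i (i + 1 + t) := by
    intro i
    rw [← Finset.sum_filter]
    have hf : (Finset.range r.length).filter (fun k => i < k) = Finset.Ico (i+1) r.length := by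
      ext k
      simp only [Finset.mem_filter, Finset.mem_Ico, Finset.mem_range]
      omega
    rw [hf, Finset.sum_Ico_eq_sum_range]
  simp only [hinner]
  rcases Nat.eq_zero_or_pos r.length with h0 | hpos
  · simp [h0]
  · obtain ⟨m, hm⟩ : ∃ m, r.length = m + 1 := ⟨r.length - 1, by omega⟩
    rw [hm, Finset.sum_range_succ]
    simp

def cw (r : List Int) (i : Nat) (v : Int) : Int :=
  ∑ k ∈ Finset.range r.length, if k ≠ i then cf v (r.getD k 0) i k else 0

theorem cf_comm (x y : Int) (i k : Nat) : cf x y i k = cf y x k i := by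
  unfold cf
  rw [abs_sub_comm ((i:Int)) k, abs_sub_comm x y]
  simp [eq_comm]

theorem cwA_eq (r : List Int) (i : Nat) (v : Int) : conflictsWith r (i : Int) v = cw r i v := by
  unfold conflictsWith cw
  rw [foldl_ite, zero_add, sum_pyRange_zero]
  refine Finset.sum_congr rfl (fun k hk => ?_)
  simp only [PySem.List.pyGetD_natCast]
  by_cases h : k = i
  · simp [h]
  · simp only [cf, Ne, Nat.cast_inj, h, not_false_iff, if_pos]
    simp [eq_comm]

-- split an "all k ≠ i" sum into k > i and k < i parts
theorem sum_ne_split (n i : Nat) (f : Nat → Int) :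
    (∑ k ∈ Finset.range n, if k ≠ i then f k else 0)
      = (∑ k ∈ Finset.range n, if i < k then f k else 0)
        + (∑ k ∈ Finset.range n, if k < i then f k else 0) := by
  rw [← Finset.sum_add_distrib]
  refine Finset.sum_congr rfl (fun k hk => ?_)
  rcases lt_trichotomy k i with h | h | h <;> simp [h] <;> omega

def atkNot (r : List Int) (i : Nat) : Int :=
  ∑ a ∈ Finset.range r.length, ∑ b ∈ Finset.range r.length,
    if a < b ∧ a ≠ i ∧ b ≠ i then cf (r.getD a 0) (r.getD b 0) a b else 0

theorem atk_split (r : List Int) (i : Nat) (hi : i < r.length) :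
    atk r = atkNot r i + cw r i (r.getD i 0) := by
  unfold atk atkNot cw
  have hdec : ∀ a b : Nat,
      (if a < b then cf (r.getD a 0) (r.getD b 0) a b else 0)
        = (if a < b ∧ a ≠ i ∧ b ≠ i then cf (r.getD a 0) (r.getD b 0) a b else 0)
          + (if a = i then (if a < b then cf (r.getD a 0) (r.getD b 0) a b else 0) else 0)
          + (if b = i ∧ a ≠ i then (if a < b then cf (r.getD a 0) (r.getD b 0) a b else 0) else 0) := by
    intro a b
    by_cases hab : a < b <;> by_cases ha : a = i <;> by_cases hb : b = i <;>
      simp [hab, ha, hb]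
  calc ∑ a ∈ Finset.range r.length, ∑ b ∈ Finset.range r.length,
        (if a < b then cf (r.getD a 0) (r.getD b 0) a b else 0)
      = ∑ a ∈ Finset.range r.length, ∑ b ∈ Finset.range r.length,
        ((if a < b ∧ a ≠ i ∧ b ≠ i then cf (r.getD a 0) (r.getD b 0) a b else 0)
          + (if a = i then (if a < b then cf (r.getD a 0) (r.getD b 0) a b else 0) else 0)
          + (if b = i ∧ a ≠ i then (if a < b then cf (r.getD a 0) (r.getD b 0) a b else 0) else 0)) := by
        refine Finset.sum_congr rfl (fun a _ => Finset.sum_congr rfl (fun b _ => hdec a b))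
    _ = _ := by
        simp only [Finset.sum_add_distrib]
        have h2 : (∑ a ∈ Finset.range r.length, ∑ b ∈ Finset.range r.length,
            (if a = i then (if a < b then cf (r.getD a 0) (r.getD b 0) a b else 0) else 0))
            = ∑ b ∈ Finset.range r.length, (if i < b then cf (r.getD i 0) (r.getD b 0) i b else 0) := by
          rw [Finset.sum_eq_single_of_mem i (Finset.mem_range.2 hi) (fun a _ ha => by simp [ha])]
          simp
        have h3 : (∑ a ∈ Finset.range r.length, ∑ b ∈ Finset.range r.length,
            (if b = i ∧ a ≠ i then (if a < b then cf (r.getD a 0) (r.getD b 0) a b else 0) else 0))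
            = ∑ a ∈ Finset.range r.length, (if a < i then cf (r.getD a 0) (r.getD i 0) a i else 0) := by
          refine Finset.sum_congr rfl (fun a _ => ?_)
          by_cases ha : a = i
          · simp [ha]
          · simp [ha, Finset.sum_ite_eq', Finset.mem_range.2 hi]
        have h4 : (∑ a ∈ Finset.range r.length, (if a < i then cf (r.getD a 0) (r.getD i 0) a i else 0))
            = ∑ k ∈ Finset.range r.length, (if k < i then cf (r.getD i 0) (r.getD k 0) i k else 0) := by
          refine Finset.sum_congr rfl (fun a _ => ?_)
          split_ifs with h
          · rw [cf_comm]
          · rfl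
        rw [h2, h3, h4, sum_ne_split]
        ring

theorem sum_cw (r : List Int) :
    ∑ i ∈ Finset.range r.length, cw r i (r.getD i 0) = 2 * atk r := by
  unfold cw atk
  simp only [sum_ne_split, Finset.sum_add_distrib]
  have h2 : (∑ i ∈ Finset.range r.length, ∑ k ∈ Finset.range r.length,
      (if k < i then cf (r.getD i 0) (r.getD k 0) i k else 0))
      = ∑ a ∈ Finset.range r.length, ∑ b ∈ Finset.range r.length,
        (if a < b then cf (r.getD a 0) (r.getD b 0) a b else 0) := by
    rw [Finset.sum_comm]
    refine Finset.sum_congr rfl (fun a _ => Finset.sum_congr rfl (fun b _ => ?_))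
    split_ifs with h
    · rw [cf_comm]
    · rfl
  rw [h2]
  ring

theorem getD_set' (r : List Int) (i : Nat) (j : Int) (k : Nat) (hk : k < r.length) :
    (r.set i j).getD k 0 = if k = i then j else r.getD k 0 := by
  by_cases h : k = i
  · subst h
    rw [if_pos rfl]
    rw [List.getD_eq_getElem _ _ (by simpa using hk)]
    simp
  · rw [if_neg h]
    rw [List.getD_eq_getElem _ _ (by simpa using hk), List.getD_eq_getElem _ _ hk]
    rw [List.getElem_set]
    rw [if_neg (fun hh => h hh.symm)]

theorem cw_set (r : List Int) (i : Nat) (j : Int) (v : Int) :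
    cw (r.set i j) i v = cw r i v := by
  unfold cw
  rw [List.length_set]
  refine Finset.sum_congr rfl (fun k hk => ?_)
  split_ifs with h
  · rw [getD_set' r i j k (Finset.mem_range.1 hk), if_neg h]
  · rfl

theorem atk_set (r : List Int) (i : Nat) (hi : i < r.length) (j : Int) :
    atk (r.set i j) = atk r - cw r i (r.getD i 0) + cw r i j := by
  have hi' : i < (r.set i j).length := by simpa using hi
  rw [atk_split (r.set i j) i hi']
  have hgi : (r.set i j).getD i 0 = j := by
    rw [getD_set' r i j i hi, if_pos rfl]
  have hnot : atkNot (r.set i j) i = atkNot r i := by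
    unfold atkNot
    rw [List.length_set]
    refine Finset.sum_congr rfl (fun a ha => Finset.sum_congr rfl (fun b hb => ?_))
    split_ifs with h
    · rw [getD_set' r i j a (Finset.mem_range.1 ha), getD_set' r i j b (Finset.mem_range.1 hb),
        if_neg h.2.1, if_neg h.2.2]
    · rfl
  rw [hgi, hnot, cw_set]
  have := atk_split r i hi
  omega

theorem slice_full (r : List Int) : PySem.List.slice r (some 0) (some (r.length : Int)) = r := by
  rw [PySem.List.slice_zero_start, PySem.List.slice_to_natCast, List.take_length]

def ciL (r : List Int) : List Int :=
  (PySem.List.pyRange 0 (r.length : Int) 1).map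
    (fun i => conflictsWith r i (PySem.List.pyGetD r i 0))

def baseI (r : List Int) : Int := PySem.Int.floordiv (ciL r).sum 2

theorem ciL_get (r : List Int) (i : Nat) (hi : i < r.length) :
    PySem.List.pyGetD (ciL r) (i : Int) 0 = cw r i (r.getD i 0) := by
  unfold ciL
  rw [show PySem.List.pyRange 0 (r.length : Int) 1 = PySem.List.pyRange 0 (r.length : Int) from rfl,
    PySem.List.pyGetD_map_pyRange _ _ _ _ hi]
  rw [PySem.List.pyGetD_natCast, cwA_eq]

theorem qA_eq (r : List Int) : quantidadeDeAtaques r = atk r := by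
  rw [qA_eq_common, atk_eq_common]

theorem baseI_eq (r : List Int) : baseI r = atk r := by
  unfold baseI
  have hsum : (ciL r).sum = 2 * atk r := by
    unfold ciL
    rw [show PySem.List.pyRange 0 (r.length : Int) 1 = PySem.List.pyRange 0 (r.length : Int) from rfl,
      PySem.List.pyRange_zero_natCast, List.map_map, list_sum_range, ← sum_cw]
    refine Finset.sum_congr rfl (fun k _ => ?_)
    show conflictsWith r (k : Int) (PySem.List.pyGetD r (k : Int) 0) = _
    rw [PySem.List.pyGetD_natCast, cwA_eq]
  rw [hsum]
  show Int.fdiv (2 * atk r) 2 = atk r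
  exact Int.mul_fdiv_cancel_left _ (by norm_num)

theorem set_slices (r : List Int) (i : Nat) (hi : i < r.length) (j : Int) :
    PySem.List.slice r (some 0) (some (i : Int)) ++ [j] ++ PySem.List.slice r (some ((i : Int) + 1)) none
      = r.set i j := by
  rw [PySem.List.slice_zero_start, PySem.List.slice_to_natCast,
    show ((i : Int) + 1) = ((i + 1 : Nat) : Int) by push_cast; ring,
    PySem.List.slice_from_natCast, List.set_eq_take_cons_drop j hi]
  simp

theorem va_eq (r : List Int) (i : Nat) (hi : i < r.length) (j : Int) :
    quantidadeDeAtaques (PySem.List.pySetD (PySem.List.slice r (some 0) (some (r.length : Int))) (i : Int) j)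
      = baseI r - PySem.List.pyGetD (ciL r) (i : Int) 0 + conflictsWith r (i : Int) j := by
  rw [slice_full, PySem.List.pySetD_natCast, qA_eq, atk_set r i hi j, baseI_eq, ciL_get r i hi, cwA_eq]

theorem inner_eq (r : List Int) (i : Nat) (hi : i < r.length) (l : List Int)
    (stA : List Int × List Int × Int × Int) (stB : List Int × Int)
    (h1 : stA.2.1 = stB.1) (h2 : stA.2.2.1 = stB.2) :
    ((l.foldl (fun (st : List Int × List Int × Int × Int) j =>
        if j = PySem.List.pyGetD r (i : Int) 0 then st
        else
          let na := PySem.List.slice r (some 0) (some (r.length : Int))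
          let na := PySem.List.pySetD na (i : Int) j
          let va := quantidadeDeAtaques na
          if va < st.2.2.1 then (na, PySem.List.slice na (some 0) (some (na.length : Int)), va, va)
          else (na, st.2.1, st.2.2.1, va)) stA).2.1
      = (l.foldl (fun (st : List Int × Int) j =>
        if j = PySem.List.pyGetD r (i : Int) 0 then st
        else
          let va := baseI r - PySem.List.pyGetD (ciL r) (i : Int) 0 + conflictsWith r (i : Int) j
          if va < st.2 then
            (PySem.List.slice r (some 0) (some (i : Int)) ++ [j] ++ PySem.List.slice r (some ((i : Int) + 1)) none, va)
          else st) stB).1)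
    ∧ ((l.foldl (fun (st : List Int × List Int × Int × Int) j =>
        if j = PySem.List.pyGetD r (i : Int) 0 then st
        else
          let na := PySem.List.slice r (some 0) (some (r.length : Int))
          let na := PySem.List.pySetD na (i : Int) j
          let va := quantidadeDeAtaques na
          if va < st.2.2.1 then (na, PySem.List.slice na (some 0) (some (na.length : Int)), va, va)
          else (na, st.2.1, st.2.2.1, va)) stA).2.2.1
      = (l.foldl (fun (st : List Int × Int) j =>
        if j = PySem.List.pyGetD r (i : Int) 0 then st
        else
          let va := baseI r - PySem.List.pyGetD (ciL r) (i : Int) 0 + conflictsWith r (i : Int) j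
          if va < st.2 then
            (PySem.List.slice r (some 0) (some (i : Int)) ++ [j] ++ PySem.List.slice r (some ((i : Int) + 1)) none, va)
          else st) stB).2) := by
  induction l generalizing stA stB with
  | nil => exact ⟨h1, h2⟩
  | cons j l ih =>
      simp only [List.foldl_cons]
      by_cases hj : j = PySem.List.pyGetD r (i : Int) 0
      · rw [if_pos hj, if_pos hj]
        exact ih stA stB h1 h2
      · rw [if_neg hj, if_neg hj]
        set na := PySem.List.pySetD (PySem.List.slice r (some 0) (some (r.length : Int))) (i : Int) j with hna
        have hnaset : na = r.set i j := by
          rw [hna, slice_full, PySem.List.pySetD_natCast]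
        have hva : quantidadeDeAtaques na
            = baseI r - PySem.List.pyGetD (ciL r) (i : Int) 0 + conflictsWith r (i : Int) j :=
          va_eq r i hi j
        have hmr : PySem.List.slice na (some 0) (some (na.length : Int))
            = PySem.List.slice r (some 0) (some (i : Int)) ++ [j] ++ PySem.List.slice r (some ((i : Int) + 1)) none := by
          rw [slice_full, hnaset, set_slices r i hi j]
        rw [hva, h2]
        by_cases hlt : baseI r - PySem.List.pyGetD (ciL r) (i : Int) 0 + conflictsWith r (i : Int) j < stB.2
        · rw [if_pos hlt, if_pos hlt]
          exact ih _ _ hmr rfl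
        · rw [if_neg hlt, if_neg hlt]
          exact ih _ _ h1 rfl

theorem outer_eq (r : List Int) (l : List Int) (H : ∀ x ∈ l, 0 ≤ x ∧ x < (r.length : Int))
    (stA : List Int × List Int × Int × Int) (stB : List Int × Int)
    (h1 : stA.2.1 = stB.1) (h2 : stA.2.2.1 = stB.2) :
    ((l.foldl (fun (st : List Int × List Int × Int × Int) i =>
        (PySem.List.pyRange 0 (r.length : Int) 1).foldl (fun (st : List Int × List Int × Int × Int) j =>
          if j = PySem.List.pyGetD r i 0 then st
          else
            let na := PySem.List.slice r (some 0) (some (r.length : Int))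
            let na := PySem.List.pySetD na i j
            let va := quantidadeDeAtaques na
            if va < st.2.2.1 then (na, PySem.List.slice na (some 0) (some (na.length : Int)), va, va)
            else (na, st.2.1, st.2.2.1, va)) st) stA).2.1
      = (l.foldl (fun (st : List Int × Int) i =>
        (PySem.List.pyRange 0 (r.length : Int) 1).foldl (fun (st : List Int × Int) j =>
          if j = PySem.List.pyGetD r i 0 then st
          else
            let va := baseI r - PySem.List.pyGetD (ciL r) i 0 + conflictsWith r i j
            if va < st.2 then
              (PySem.List.slice r (some 0) (some i) ++ [j] ++ PySem.List.slice r (some (i + 1)) none, va)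
            else st) st) stB).1)
    ∧ ((l.foldl (fun (st : List Int × List Int × Int × Int) i =>
        (PySem.List.pyRange 0 (r.length : Int) 1).foldl (fun (st : List Int × List Int × Int × Int) j =>
          if j = PySem.List.pyGetD r i 0 then st
          else
            let na := PySem.List.slice r (some 0) (some (r.length : Int))
            let na := PySem.List.pySetD na i j
            let va := quantidadeDeAtaques na
            if va < st.2.2.1 then (na, PySem.List.slice na (some 0) (some (na.length : Int)), va, va)
            else (na, st.2.1, st.2.2.1, va)) st) stA).2.2.1
      = (l.foldl (fun (st : List Int × Int) i =>
        (PySem.List.pyRange 0 (r.length : Int) 1).foldl (fun (st : List Int × Int) j =>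
          if j = PySem.List.pyGetD r i 0 then st
          else
            let va := baseI r - PySem.List.pyGetD (ciL r) i 0 + conflictsWith r i j
            if va < st.2 then
              (PySem.List.slice r (some 0) (some i) ++ [j] ++ PySem.List.slice r (some (i + 1)) none, va)
            else st) st) stB).2) := by
  induction l generalizing stA stB with
  | nil => exact ⟨h1, h2⟩
  | cons x l ih =>
      obtain ⟨hx0, hxn⟩ := H x (List.mem_cons_self)
      have hx : x = ((x.toNat : Nat) : Int) := (Int.toNat_of_nonneg hx0).symm
      have hmn : x.toNat < r.length := by omega
      simp only [List.foldl_cons]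
      rw [hx]
      have step := inner_eq r x.toNat hmn (PySem.List.pyRange 0 (r.length : Int) 1) stA stB h1 h2
      exact ih (fun y hy => H y (List.mem_cons_of_mem _ hy)) _ _ step.1 step.2

theorem melhorVizinho_eq_alt (r : List Int) : melhorVizinho r = melhorVizinho_alt r := by
  have H : ∀ x ∈ PySem.List.pyRange 0 (r.length : Int) 1, 0 ≤ x ∧ x < (r.length : Int) := by
    intro x hx
    have := PySem.List.mem_pyRange_one.mp hx
    omega
  have main := outer_eq r (PySem.List.pyRange 0 (r.length : Int) 1) H
    (r, r, quantidadeDeAtaques r, quantidadeDeAtaques r) (r, baseI r) rfl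
    (by show quantidadeDeAtaques r = baseI r; rw [qA_eq, baseI_eq])
  unfold melhorVizinho melhorVizinho_alt
  simp only [slice_full] at main ⊢
  exact Prod.ext main.1 main.2

-- ===== VERDICT (by name: the statement is the Claim_ definition above) =====
theorem melhorVizinho_spec : Claim_equal_melhorVizinho := by
  intro r _
  show melhorVizinho r = melhorVizinho_alt r
  exact melhorVizinho_eq_alt r
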